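-- pv_equiv track=rewrite | github.com/suryapr3/Jenkins | scripts/Register_test_generation_scripts/reg_test_gen.py | address_array
-- ===== SOURCE A (Python) =====
-- def address_array(base_address_list):
--     c_code =""
--     c_code += "    uint32_t base_address[] = {\n    "
--     for i, macro in enumerate(base_address_list):
--         c_code += "" +macro
--         if (i + 1) % 5 == 0 and i != len(base_address_list) - 1:
--             c_code += ",\n    "
--         elif i != len(base_address_list) - 1:
--             c_code += ", "
--         else:
--             c_code += "\n"
--     c_code += "    };\n"
--     return c_code
-- ===== SOURCE B (Python) =====
-- def address_array(base_address_list):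
--     prefix = "    uint32_t base_address[] = {\n    "
--     rows = [", ".join(base_address_list[k:k + 5])
--             for k in range(0, len(base_address_list), 5)]
--     body = ",\n    ".join(rows) + "\n" if base_address_list else ""
--     return prefix + body + "    };\n"
-- ===== Notes on version B (the rewrite author's own statement) =====
-- stated objective: simpler
-- what changed: A builds the string one element at a time, branching on (i+1)%5 and on whether i is the last index; B slices the list into chunks of 5, joins each chunk with ', ', joins the rows with ',\n ' and appends the suffix, with no per-element index arithmetic. (str.join over chunks instead of repeated += concatenation).
import Mathlib
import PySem

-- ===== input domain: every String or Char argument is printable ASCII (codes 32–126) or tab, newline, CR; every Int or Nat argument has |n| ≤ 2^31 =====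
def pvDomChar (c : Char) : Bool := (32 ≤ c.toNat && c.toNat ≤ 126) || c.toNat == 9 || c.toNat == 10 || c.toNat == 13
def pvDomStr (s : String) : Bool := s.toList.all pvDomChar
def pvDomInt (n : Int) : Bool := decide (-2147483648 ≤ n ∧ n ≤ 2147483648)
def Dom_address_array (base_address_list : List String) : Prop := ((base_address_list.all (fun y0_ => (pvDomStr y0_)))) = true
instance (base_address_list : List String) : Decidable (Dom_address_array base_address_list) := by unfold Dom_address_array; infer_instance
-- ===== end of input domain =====

-- B replaces A's per-element index-modulo branching by chunking the list into rows of 5 and joining the rows; objective: simpler decomposition (same cost).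

-- ===== PORT A =====
def address_array (base_address_list : List String) : String :=
  let c_code : String := "" ++ "    uint32_t base_address[] = {\n    "
  let c_code :=
    (PySem.List.enumerate base_address_list).foldl
      (fun c_code p =>
        let c_code := c_code ++ "" ++ p.2
        if PySem.Int.mod (p.1 + 1) 5 = 0 ∧ p.1 ≠ (base_address_list.length : Int) - 1 then
          c_code ++ ",\n    "
        else if p.1 ≠ (base_address_list.length : Int) - 1 then
          c_code ++ ", "
        else
          c_code ++ "\n") c_code
  c_code ++ "    };\n"

-- ===== PORT B =====
-- str.join, transcribed by hand (exact on all inputs)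
def pvJoin (sep : String) : List String → String
  | [] => ""
  | [x] => x
  | x :: y :: t => x ++ sep ++ pvJoin sep (y :: t)

-- the chunks base_address_list[k:k+5] for k = 0, 5, 10, … of Source B's comprehension
def pvChunks5 (l : List String) : List (List String) :=
  if h : l = [] then [] else l.take 5 :: pvChunks5 (l.drop 5)
termination_by l.length
decreasing_by cases l with
  | nil => exact absurd rfl h
  | cons a t => simp

def address_array_alt (base_address_list : List String) : String :=
  let prefix_ : String := "    uint32_t base_address[] = {\n    "
  let rows := (pvChunks5 base_address_list).map (fun c => pvJoin ", " c)
  let body := if base_address_list ≠ [] then pvJoin ",\n    " rows ++ "\n" else ""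
  prefix_ ++ body ++ "    };\n"

-- ===== PRECONDITION & SPEC =====
def Spec_address_array (base_address_list : List String) (out : String) : Prop := out = address_array_alt base_address_list
instance (base_address_list : List String) (out : String) : Decidable (Spec_address_array base_address_list out) := by unfold Spec_address_array; infer_instance

-- ===== CLAIM (what is proved, stated in full; the proofs are below) =====
def Claim_equal_address_array : Prop := ∀ (base_address_list : List String), Dom_address_array base_address_list → Spec_address_array base_address_list (address_array base_address_list)

-- ===== LEMMAS AND PROOFS =====

-- the suffix emitted by A's loop when the remaining elements are t and the next index is i (n = total length)
def outA (n : Int) : Int → List String → String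
  | _, [] => ""
  | i, x :: t =>
      x ++ (if PySem.Int.mod (i + 1) 5 = 0 ∧ i ≠ n - 1 then ",\n    "
            else if i ≠ n - 1 then ", " else "\n") ++ outA n (i + 1) t

theorem foldA_eq (n : Int) (t : List String) : ∀ (acc : String) (i : Int),
    (PySem.List.enumerate t i).foldl
      (fun c_code p =>
        let c_code := c_code ++ "" ++ p.2
        if PySem.Int.mod (p.1 + 1) 5 = 0 ∧ p.1 ≠ n - 1 then c_code ++ ",\n    "
        else if p.1 ≠ n - 1 then c_code ++ ", "
        else c_code ++ "\n") acc = acc ++ outA n i t := by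
  induction t with
  | nil => intro acc i; simp [PySem.List.enumerate_nil, outA]
  | cons x t ih =>
      intro acc i
      rw [PySem.List.enumerate_cons, List.foldl_cons, ih]
      simp only [outA]
      split_ifs <;> simp [String.append_assoc]

theorem chunks_small (l : List String) (h1 : l ≠ []) (h2 : l.length ≤ 5) : pvChunks5 l = [l] := by
  rw [pvChunks5, dif_neg h1, List.take_of_length_le h2, List.drop_eq_nil_of_le h2, pvChunks5]
  simp

theorem outA_comma (n i : Int) (x : String) (t : List String)
    (h1 : ¬ PySem.Int.mod (i + 1) 5 = 0) (h2 : i ≠ n - 1) :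
    outA n i (x :: t) = x ++ ", " ++ outA n (i + 1) t := by
  simp only [outA]
  rw [if_neg (by tauto), if_pos h2, String.append_assoc]

theorem outA_row (n i : Int) (x : String) (t : List String)
    (h1 : PySem.Int.mod (i + 1) 5 = 0) (h2 : i ≠ n - 1) :
    outA n i (x :: t) = x ++ ",\n    " ++ outA n (i + 1) t := by
  simp only [outA]
  rw [if_pos ⟨h1, h2⟩, String.append_assoc]

theorem outA_last (n i : Int) (x : String) (t : List String) (h2 : i = n - 1) :
    outA n i (x :: t) = x ++ "\n" ++ outA n (i + 1) t := by
  simp only [outA]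
  rw [if_neg (by tauto), if_neg (by tauto), String.append_assoc]

theorem pv_mod5 (k : Int) : PySem.Int.mod k 5 = k % 5 :=
  PySem.Int.mod_eq_emod_of_pos (by norm_num)

theorem outB_eq (m : Nat) : ∀ (l : List String), l.length ≤ m → l ≠ [] → ∀ i : Int, i % 5 = 0 →
    outA (i + l.length) i l =
      pvJoin ",\n    " ((pvChunks5 l).map (fun c => pvJoin ", " c)) ++ "\n" := by
  induction m with
  | zero => intro l hl hne; simp_all [List.length_eq_zero_iff]
  | succ m ih =>
      intro l hl hne i hi
      match l with
      | [a] =>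
          rw [outA_last _ _ _ _ (by simp), chunks_small _ (by simp) (by simp)]
          simp [outA, pvJoin]
      | [a, b] =>
          rw [outA_comma _ _ _ _ (by rw [pv_mod5]; omega) (by simp <;> omega),
            outA_last _ _ _ _ (by simp <;> omega), chunks_small _ (by simp) (by simp)]
          simp [outA, pvJoin, String.append_assoc]
      | [a, b, c] =>
          rw [outA_comma _ _ _ _ (by rw [pv_mod5]; omega) (by simp <;> omega),
            outA_comma _ _ _ _ (by rw [pv_mod5]; omega) (by simp <;> omega),
            outA_last _ _ _ _ (by simp <;> omega), chunks_small _ (by simp) (by simp)]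
          simp [outA, pvJoin, String.append_assoc]
      | [a, b, c, d] =>
          rw [outA_comma _ _ _ _ (by rw [pv_mod5]; omega) (by simp <;> omega),
            outA_comma _ _ _ _ (by rw [pv_mod5]; omega) (by simp <;> omega),
            outA_comma _ _ _ _ (by rw [pv_mod5]; omega) (by simp <;> omega),
            outA_last _ _ _ _ (by simp <;> omega), chunks_small _ (by simp) (by simp)]
          simp [outA, pvJoin, String.append_assoc]
      | [a, b, c, d, e] =>
          rw [outA_comma _ _ _ _ (by rw [pv_mod5]; omega) (by simp <;> omega),
            outA_comma _ _ _ _ (by rw [pv_mod5]; omega) (by simp <;> omega),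
            outA_comma _ _ _ _ (by rw [pv_mod5]; omega) (by simp <;> omega),
            outA_comma _ _ _ _ (by rw [pv_mod5]; omega) (by simp <;> omega),
            outA_last _ _ _ _ (by simp <;> omega), chunks_small _ (by simp) (by simp)]
          simp [outA, pvJoin, String.append_assoc]
      | a :: b :: c :: d :: e :: x :: t =>
          have en : i + (((a :: b :: c :: d :: e :: x :: t).length : Nat) : Int)
              = (i + 5) + (((x :: t).length : Nat) : Int) := by push_cast [List.length_cons]; ring
          rw [en]
          have e5 : i + 1 + 1 + 1 + 1 + 1 = i + 5 := by ring
          have hlast : ∀ j : Int, j ≤ i + 4 → j ≠ (i + 5) + (((x :: t).length : Nat) : Int) - 1 := by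
            intro j hj; push_cast [List.length_cons]; omega
          rw [outA_comma _ _ _ _ (by rw [pv_mod5]; omega) (hlast i (by omega)),
            outA_comma _ _ _ _ (by rw [pv_mod5]; omega) (hlast _ (by omega)),
            outA_comma _ _ _ _ (by rw [pv_mod5]; omega) (hlast _ (by omega)),
            outA_comma _ _ _ _ (by rw [pv_mod5]; omega) (hlast _ (by omega)),
            outA_row _ _ _ _ (by rw [pv_mod5]; omega) (hlast _ (by omega)), e5,
            ih (x :: t) (by simp only [List.length_cons] at hl ⊢; omega) (by simp) (i + 5) (by omega)]
          have hch : pvChunks5 (a :: b :: c :: d :: e :: x :: t)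
              = [a, b, c, d, e] :: pvChunks5 (x :: t) := by
            rw [pvChunks5]; simp
          have hch2 : pvChunks5 (x :: t) = (x :: t).take 5 :: pvChunks5 ((x :: t).drop 5) := by
            rw [pvChunks5]; simp
          rw [hch, hch2]
          simp [pvJoin, String.append_assoc]

theorem address_array_spec : Claim_equal_address_array := by
  intro l _
  unfold Spec_address_array address_array address_array_alt
  simp only []
  rw [foldA_eq]
  by_cases hne : l = []
  · subst hne; simp [outA]
  · have hi : (0 : Int) % 5 = 0 := by decide
    have := outB_eq l.length l le_rfl hne 0 hi
    simp only [zero_add] at this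
    rw [this]
    simp [hne, String.append_assoc]
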